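-- pv_equiv track=rewrite | github.com/bosserz/sat-simulation-2 | app.py | _build_adaptive_module2_set
-- ===== SOURCE A (Python) =====
-- def _build_adaptive_module2_set(section_questions, target_label, limit):
--     """Build a fixed-size module-2 set, prioritizing target difficulty then backfilling."""
--     priority_by_target = {
--         "Hard": ["Hard", "Medium", "Easy"],
--         "Medium": ["Medium", "Hard", "Easy"],
--         "Easy": ["Easy", "Medium", "Hard"],
--     }
--     priority = priority_by_target.get(target_label, ["Medium", "Hard", "Easy"])
--
--     selected = []
--     seen_ids = set()
--
--     for label in priority:
--         for question in section_questions: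
--             q_label = question.get("difficulty_label") or "Medium"
--             q_id = question.get("question_id")
--             if q_label == label and q_id not in seen_ids:
--                 selected.append(question)
--                 seen_ids.add(q_id)
--                 if len(selected) >= limit:
--                     return selected
--
--     # Final fallback: include any remaining questions if labels are missing/inconsistent.
--     for question in section_questions:
--         q_id = question.get("question_id")
--         if q_id not in seen_ids:
--             selected.append(question)
--             seen_ids.add(q_id)
--             if len(selected) >= limit:
--                 return selected
--
--     return selected
-- ===== SOURCE B (Python) =====
-- def _build_adaptive_module2_set(section_questions, target_label, limit):
--     """Stable-sort questions by priority rank of their effective label, then one dedup/truncate pass."""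
--     priority = {
--         "Hard": ["Hard", "Medium", "Easy"],
--         "Medium": ["Medium", "Hard", "Easy"],
--         "Easy": ["Easy", "Medium", "Hard"],
--     }.get(target_label, ["Medium", "Hard", "Easy"])
--     rank = {label: i for i, label in enumerate(priority)}
--
--     ordered = sorted(section_questions,
--                      key=lambda q: rank.get(q.get("difficulty_label") or "Medium", len(priority)))
--
--     selected = []
--     seen_ids = set()
--     for question in ordered:
--         q_id = question.get("question_id")
--         if q_id not in seen_ids:
--             seen_ids.add(q_id)
--             selected.append(question)
--             if len(selected) >= limit:
--                 break
--     return selected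
-- ===== Notes on version B (the rewrite author's own statement) =====
-- stated objective: alternative
-- what changed: B replaces A's three rescans of section_questions (one per priority label) plus fallback pass by a single stable sort of the questions by the priority rank of their effective difficulty label followed by one dedup-and-truncate pass over the sorted list.
import Mathlib
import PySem

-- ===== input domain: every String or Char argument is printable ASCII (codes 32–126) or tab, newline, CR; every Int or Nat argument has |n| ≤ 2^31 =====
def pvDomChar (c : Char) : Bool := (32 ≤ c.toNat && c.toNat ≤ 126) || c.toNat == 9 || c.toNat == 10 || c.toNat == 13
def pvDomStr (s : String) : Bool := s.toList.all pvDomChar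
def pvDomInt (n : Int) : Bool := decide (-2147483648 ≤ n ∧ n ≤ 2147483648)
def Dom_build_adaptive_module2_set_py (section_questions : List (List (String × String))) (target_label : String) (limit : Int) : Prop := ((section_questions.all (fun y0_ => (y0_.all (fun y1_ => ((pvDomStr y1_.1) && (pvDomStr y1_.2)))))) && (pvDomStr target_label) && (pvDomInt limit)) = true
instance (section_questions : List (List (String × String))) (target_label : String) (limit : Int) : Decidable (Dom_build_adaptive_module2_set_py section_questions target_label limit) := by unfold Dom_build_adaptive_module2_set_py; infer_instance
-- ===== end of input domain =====

-- B replaces A's per-label rescans plus fallback pass by ONE stable sort of the questions by the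
-- priority rank of their effective label followed by a single dedup-and-truncate pass
-- (objective: alternative; return value proved equal, no side effects involved).

-- ===== PORT A =====
-- question.get("difficulty_label") or "Medium"   ('' is falsy in Python)
def pvEff (q : List (String × String)) : String :=
  match (PySem.Dict.mk q).get? "difficulty_label" with
  | some v => if v == "" then "Medium" else v
  | none => "Medium"

-- question.get("question_id")
def pvQid (q : List (String × String)) : Option String := (PySem.Dict.mk q).get? "question_id"

-- body of A's priority loop: label test, dedup, append, early-return flag
def pvStepA (limit : Int) (label : String)
    (st : List (List (String × String)) × PySem.Set (Option String) × Bool)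
    (q : List (String × String)) : List (List (String × String)) × PySem.Set (Option String) × Bool :=
  if st.2.2 then st
  else if (pvEff q == label) && !(PySem.Set.contains st.2.1 (pvQid q)) then
    (st.1 ++ [q], PySem.Set.add st.2.1 (pvQid q), decide (limit ≤ ((st.1 ++ [q]).length : Int)))
  else st

-- body of A's final fallback loop (no label test)
def pvStepFBA (limit : Int)
    (st : List (List (String × String)) × PySem.Set (Option String) × Bool)
    (q : List (String × String)) : List (List (String × String)) × PySem.Set (Option String) × Bool :=
  if st.2.2 then st
  else if !(PySem.Set.contains st.2.1 (pvQid q)) then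
    (st.1 ++ [q], PySem.Set.add st.2.1 (pvQid q), decide (limit ≤ ((st.1 ++ [q]).length : Int)))
  else st

def build_adaptive_module2_set_py (section_questions : List (List (String × String))) (target_label : String) (limit : Int) : List (List (String × String)) :=
  let priority := (PySem.Dict.mk
    [("Hard", ["Hard", "Medium", "Easy"]),
     ("Medium", ["Medium", "Hard", "Easy"]),
     ("Easy", ["Easy", "Medium", "Hard"])]).getD target_label ["Medium", "Hard", "Easy"]
  let st := priority.foldl (fun st label => section_questions.foldl (pvStepA limit label) st)
    ([], PySem.Set.empty, false)
  let st2 := section_questions.foldl (pvStepFBA limit) st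
  st2.1

-- ===== PORT B =====
-- rank.get(question.get("difficulty_label") or "Medium", len(priority))
-- with rank = {label: i for i, label in enumerate(priority)}
def pvRank (priority : List String) (q : List (String × String)) : Int :=
  (PySem.Dict.mk ((PySem.List.enumerate priority).map (fun p => (p.2, p.1)))).getD
    (pvEff q) (priority.length : Int)

-- B's single dedup/truncate loop over the sorted list ('break' = returning the list built so far)
def pvEmit (limit : Int) :
    PySem.Set (Option String) → List (List (String × String)) → List (List (String × String)) →
    List (List (String × String))
  | _, acc, [] => acc
  | seen, acc, q :: rest =>
    if PySem.Set.contains seen (pvQid q) then pvEmit limit seen acc rest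
    else if limit ≤ (acc.length : Int) + 1 then acc ++ [q]
    else pvEmit limit (PySem.Set.add seen (pvQid q)) (acc ++ [q]) rest

def build_adaptive_module2_set_py_alt (section_questions : List (List (String × String))) (target_label : String) (limit : Int) : List (List (String × String)) :=
  let priority := (PySem.Dict.mk
    [("Hard", ["Hard", "Medium", "Easy"]),
     ("Medium", ["Medium", "Hard", "Easy"]),
     ("Easy", ["Easy", "Medium", "Hard"])]).getD target_label ["Medium", "Hard", "Easy"]
  let ordered := PySem.List.sorted section_questions (pvRank priority)
  pvEmit limit PySem.Set.empty [] ordered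

-- ===== PRECONDITION & SPEC =====
def Spec_build_adaptive_module2_set_py (section_questions : List (List (String × String))) (target_label : String) (limit : Int) (out : List (List (String × String))) : Prop := out = build_adaptive_module2_set_py_alt section_questions target_label limit
instance (section_questions : List (List (String × String))) (target_label : String) (limit : Int) (out : List (List (String × String))) : Decidable (Spec_build_adaptive_module2_set_py section_questions target_label limit out) := by unfold Spec_build_adaptive_module2_set_py; infer_instance

-- ===== CLAIM (what is proved, stated in full; the proofs are below) =====
def Claim_equal_build_adaptive_module2_set_py : Prop := ∀ (section_questions : List (List (String × String))) (target_label : String) (limit : Int), Dom_build_adaptive_module2_set_py section_questions target_label limit → Spec_build_adaptive_module2_set_py section_questions target_label limit (build_adaptive_module2_set_py section_questions target_label limit)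

-- ===== LEMMAS AND PROOFS =====

-- a stopped state absorbs the rest of any fold
theorem pv_stop_foldl (limit : Int) (l : List (List (String × String)))
    (st : List (List (String × String)) × PySem.Set (Option String) × Bool)
    (h : st.2.2 = true) : l.foldl (pvStepFBA limit) st = st := by
  induction l with
  | nil => rfl
  | cons q t ih => simp [List.foldl, pvStepFBA, h, ih]

-- contains on a PySem.Set is membership
theorem pv_mem_iff (s : PySem.Set (Option String)) (x : Option String) :
    PySem.Set.contains s x = true ↔ x ∈ s := by
  simp [PySem.Set.contains]

-- the element just added is in the set
theorem pv_contains_add_self (s : PySem.Set (Option String)) (x : Option String) :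
    PySem.Set.contains (PySem.Set.add s x) x = true := by
  unfold PySem.Set.add
  split <;> simp_all [PySem.Set.contains]

-- one step never loses a seen id
theorem pv_step_seen (limit : Int)
    (st : List (List (String × String)) × PySem.Set (Option String) × Bool)
    (q : List (String × String)) (x : Option String)
    (h : PySem.Set.contains st.2.1 x = true) :
    PySem.Set.contains (pvStepFBA limit st q).2.1 x = true := by
  unfold pvStepFBA
  split_ifs <;> simp_all

-- seen ids only grow along the fold
theorem pv_seen_mono (limit : Int) (l : List (List (String × String)))
    (st : List (List (String × String)) × PySem.Set (Option String) × Bool)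
    (x : Option String) (h : PySem.Set.contains st.2.1 x = true) :
    PySem.Set.contains (l.foldl (pvStepFBA limit) st).2.1 x = true := by
  induction l generalizing st with
  | nil => exact h
  | cons q t ih => exact ih _ (pv_step_seen limit st q x h)

-- after an unstopped fold, every processed id is in seen
theorem pv_seen_inv (limit : Int) (l : List (List (String × String)))
    (st : List (List (String × String)) × PySem.Set (Option String) × Bool) :
    (l.foldl (pvStepFBA limit) st).2.2 = true ∨
      ∀ q ∈ l, PySem.Set.contains (l.foldl (pvStepFBA limit) st).2.1 (pvQid q) = true := by
  induction l generalizing st with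
  | nil => right; intro q hq; cases hq
  | cons q t ih =>
    simp only [List.foldl]
    rcases ih (pvStepFBA limit st q) with h | h
    · left; exact h
    · by_cases hs : (pvStepFBA limit st q).2.2 = true
      · left
        rw [pv_stop_foldl limit t _ hs]; exact hs
      · right
        intro r hr
        rcases List.mem_cons.mp hr with rfl | hrt
        · apply pv_seen_mono
          by_cases h1 : st.2.2 = true
          · exact absurd (by simp [pvStepFBA, h1]) hs
          · by_cases h2 : PySem.Set.contains st.2.1 (pvQid r) = true
            · have he : pvStepFBA limit st r = st := by
                simp [pvStepFBA, h1, (pv_mem_iff _ _).mp h2]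
              rw [he]; exact h2
            · have hf : PySem.Set.contains st.2.1 (pvQid r) = false := by
                simpa using h2
              have hnm : pvQid r ∉ st.2.1 := fun hm => h2 ((pv_mem_iff _ _).mpr hm)
              have he : (pvStepFBA limit st r).2.1 = PySem.Set.add st.2.1 (pvQid r) := by
                simp [pvStepFBA, h1, hnm]
              rw [he]; exact pv_contains_add_self _ _
        · exact h r hrt

-- dropping elements whose id is already seen does not change the fold
theorem pv_drop (limit : Int) (p : List (String × String) → Bool)
    (l : List (List (String × String)))
    (st : List (List (String × String)) × PySem.Set (Option String) × Bool)
    (h : ∀ q ∈ l, p q = false → PySem.Set.contains st.2.1 (pvQid q) = true) :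
    l.foldl (pvStepFBA limit) st = (l.filter p).foldl (pvStepFBA limit) st := by
  induction l generalizing st with
  | nil => rfl
  | cons q t ih =>
    by_cases hp : p q = true
    · simp only [List.filter, hp, List.foldl]
      exact ih _ (fun r hr hpr => pv_step_seen limit st q _ (h r (List.mem_cons_of_mem _ hr) hpr))
    · have hpf : p q = false := by simpa using hp
      have hc := h q (List.mem_cons_self ..) hpf
      have he : pvStepFBA limit st q = st := by
        unfold pvStepFBA; split_ifs <;> simp_all
      simp only [List.filter, hpf, List.foldl, he]
      exact ih _ (fun r hr hpr => h r (List.mem_cons_of_mem _ hr) hpr)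

-- B's loop is the same transition system as A's fallback fold
theorem pv_emit_eq_foldl (limit : Int) (l : List (List (String × String)))
    (seen : PySem.Set (Option String)) (acc : List (List (String × String))) :
    pvEmit limit seen acc l = (l.foldl (pvStepFBA limit) (acc, seen, false)).1 := by
  induction l generalizing seen acc with
  | nil => rfl
  | cons q t ih =>
    by_cases hc : PySem.Set.contains seen (pvQid q) = true
    · have he : pvStepFBA limit (acc, seen, false) q = (acc, seen, false) := by
        simp [pvStepFBA, (pv_mem_iff _ _).mp hc]
      simp only [pvEmit, hc, if_true, List.foldl, he]
      exact ih seen acc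
    · have hcf : PySem.Set.contains seen (pvQid q) = false := by simpa using hc
      have hnm : pvQid q ∉ seen := fun hm => hc ((pv_mem_iff _ _).mpr hm)
      have hd : decide (limit ≤ (((acc ++ [q]).length : Nat) : Int))
          = decide (limit ≤ (acc.length : Int) + 1) := by
        have : (((acc ++ [q]).length : Nat) : Int) = (acc.length : Int) + 1 := by
          simp
        rw [this]
      have hstep : pvStepFBA limit (acc, seen, false) q
          = (acc ++ [q], PySem.Set.add seen (pvQid q), decide (limit ≤ (acc.length : Int) + 1)) := by
        simp only [pvStepFBA, hcf]
        rw [← hd]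
        simp [hnm]
      simp only [pvEmit, hcf, Bool.false_eq_true, if_false, List.foldl, hstep]
      by_cases hl : limit ≤ (acc.length : Int) + 1
      · rw [if_pos hl, show decide (limit ≤ (acc.length : Int) + 1) = true by simpa using hl,
          pv_stop_foldl limit t _ rfl]
      · rw [if_neg hl, show decide (limit ≤ (acc.length : Int) + 1) = false by simpa using hl,
          ih]

-- insertBy goes to the front of a block whose every element compares greater
theorem pv_insertBy_front {α : Type} (before : α → α → Bool) (x : α) (v : List α)
    (h : ∀ y ∈ v, before x y = true) :
    PySem.List.insertBy before x v = x :: v := by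
  cases v with
  | nil => rfl
  | cons y ys => simp [PySem.List.insertBy, h y (List.mem_cons_self ..)]

-- insertBy skips a block whose every element compares not-greater
theorem pv_insertBy_append {α : Type} (before : α → α → Bool) (x : α) (u v : List α)
    (h : ∀ y ∈ u, before x y = false) :
    PySem.List.insertBy before x (u ++ v) = u ++ PySem.List.insertBy before x v := by
  induction u with
  | nil => rfl
  | cons y ys ih =>
    simp only [List.cons_append, PySem.List.insertBy, h y (List.mem_cons_self ..)]
    simp only [Bool.false_eq_true, if_false, List.cons.injEq, true_and]
    exact ih (fun z hz => h z (List.mem_cons_of_mem _ hz))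

-- stable sort with keys in {0,1,2,3} is the concatenation of the four key buckets
theorem pv_sorted_partition {α : Type} (key : α → Int) (xs : List α)
    (hb : ∀ x, key x = 0 ∨ key x = 1 ∨ key x = 2 ∨ key x = 3) :
    PySem.List.sorted xs key
      = xs.filter (fun x => key x == 0) ++ xs.filter (fun x => key x == 1)
        ++ xs.filter (fun x => key x == 2) ++ xs.filter (fun x => key x == 3) := by
  rw [PySem.List.sorted_eq_foldl_insertBy]
  induction xs using List.reverseRecOn with
  | nil => rfl
  | append_singleton ys x ih =>
    rw [List.foldl_append, List.foldl_cons, List.foldl_nil, ih]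
    have hmem : ∀ (i : Int), ∀ y ∈ ys.filter (fun z => key z == i), key y = i := by
      intro i y hy
      simpa using List.of_mem_filter hy
    rcases hb x with hx | hx | hx | hx
    · rw [List.append_assoc, List.append_assoc,
        pv_insertBy_append _ x _ _ (fun y hy => by simp [hmem 0 y hy, hx]),
        pv_insertBy_front _ x _ (fun y hy => by
          rcases List.mem_append.mp hy with hy | hy
          · simp [hmem 1 y hy, hx]
          · rcases List.mem_append.mp hy with hy | hy
            · simp [hmem 2 y hy, hx]
            · simp [hmem 3 y hy, hx])]
      simp [List.filter_append, hx]
    · rw [List.append_assoc, List.append_assoc,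
        pv_insertBy_append _ x _ _ (fun y hy => by simp [hmem 0 y hy, hx]),
        pv_insertBy_append _ x _ _ (fun y hy => by simp [hmem 1 y hy, hx]),
        pv_insertBy_front _ x _ (fun y hy => by
          rcases List.mem_append.mp hy with hy | hy
          · simp [hmem 2 y hy, hx]
          · simp [hmem 3 y hy, hx])]
      simp [List.filter_append, hx]
    · rw [List.append_assoc, List.append_assoc,
        pv_insertBy_append _ x _ _ (fun y hy => by simp [hmem 0 y hy, hx]),
        pv_insertBy_append _ x _ _ (fun y hy => by simp [hmem 1 y hy, hx]),
        pv_insertBy_append _ x _ _ (fun y hy => by simp [hmem 2 y hy, hx]),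
        pv_insertBy_front _ x _ (fun y hy => by simp [hmem 3 y hy, hx])]
      simp [List.filter_append, hx]
    · rw [List.append_assoc, List.append_assoc,
        pv_insertBy_append _ x _ _ (fun y hy => by simp [hmem 0 y hy, hx]),
        pv_insertBy_append _ x _ _ (fun y hy => by simp [hmem 1 y hy, hx]),
        pv_insertBy_append _ x _ _ (fun y hy => by simp [hmem 2 y hy, hx]),
        PySem.List.insertBy_of_forall_not_before _ x _ (fun y hy => by simp [hmem 3 y hy, hx])]
      simp [List.filter_append, hx]

-- the rank of a question against a concrete 3-label priority list
theorem pv_rank_eq (l0 l1 l2 : String) (q : List (String × String)) :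
    pvRank [l0, l1, l2] q
      = if pvEff q = l0 then 0 else if pvEff q = l1 then 1 else if pvEff q = l2 then 2 else 3 := by
  have e : pvRank [l0, l1, l2] q
      = (Option.map (fun p => p.2) (List.find? (fun p => p.1 == pvEff q)
          [(l0, (0 : Int)), (l1, 1), (l2, 2)])).getD 3 := rfl
  rw [e]
  by_cases h0 : l0 = pvEff q
  · simp [List.find?, h0]
  · have h0' : ¬ pvEff q = l0 := fun hh => h0 hh.symm
    by_cases h1 : l1 = pvEff q
    · simp [List.find?, show (l0 == pvEff q) = false from by simp [h0], h0', h1]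
    · have h1' : ¬ pvEff q = l1 := fun hh => h1 hh.symm
      by_cases h2 : l2 = pvEff q
      · simp [List.find?, show (l0 == pvEff q) = false from by simp [h0],
          show (l1 == pvEff q) = false from by simp [h1], h0', h1', h2]
      · have h2' : ¬ pvEff q = l2 := fun hh => h2 hh.symm
        simp [List.find?, show (l0 == pvEff q) = false from by simp [h0],
          show (l1 == pvEff q) = false from by simp [h1],
          show (l2 == pvEff q) = false from by simp [h2], h0', h1', h2']

-- A's labelled step is the fallback step guarded by the label test
theorem pvStepA_split (limit : Int) (label : String)
    (st : List (List (String × String)) × PySem.Set (Option String) × Bool)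
    (q : List (String × String)) :
    pvStepA limit label st q = if pvEff q == label then pvStepFBA limit st q else st := by
  by_cases h : st.2.2
  · cases heq : (pvEff q == label) <;> simp [pvStepA, pvStepFBA, h]
  · cases heq : (pvEff q == label) <;> simp [pvStepA, pvStepFBA, h, heq]

-- A's scan of the whole list for one label equals the fallback fold over the label's bucket
theorem pv_foldA_label (limit : Int) (label : String) (sq : List (List (String × String)))
    (st : List (List (String × String)) × PySem.Set (Option String) × Bool) :
    sq.foldl (pvStepA limit label) st
      = (sq.filter (fun q => pvEff q == label)).foldl (pvStepFBA limit) st := by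
  rw [← PySem.List.foldl_if_eq_foldl_filter]
  exact PySem.List.foldl_congr_mem sq _ _ st (fun acc q _ => pvStepA_split limit label acc q)

-- the whole equivalence, for one concrete distinct priority list
theorem pv_main (limit : Int) (sq : List (List (String × String))) (l0 l1 l2 : String)
    (h01 : l0 ≠ l1) (h02 : l0 ≠ l2) (h12 : l1 ≠ l2) :
    (sq.foldl (pvStepFBA limit)
      ([l0, l1, l2].foldl (fun st label => sq.foldl (pvStepA limit label) st)
        ([], PySem.Set.empty, false))).1
      = pvEmit limit PySem.Set.empty [] (PySem.List.sorted sq (pvRank [l0, l1, l2])) := by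
  have hb : ∀ q, pvRank [l0, l1, l2] q = 0 ∨ pvRank [l0, l1, l2] q = 1
      ∨ pvRank [l0, l1, l2] q = 2 ∨ pvRank [l0, l1, l2] q = 3 := by
    intro q; rw [pv_rank_eq]; split_ifs <;> simp
  have hfe0 : sq.filter (fun q => pvRank [l0, l1, l2] q == 0)
      = sq.filter (fun q => pvEff q == l0) := by
    apply List.filter_congr; intro q _
    rw [pv_rank_eq]; split_ifs with a b c <;> simp [a]
  have hfe1 : sq.filter (fun q => pvRank [l0, l1, l2] q == 1)
      = sq.filter (fun q => pvEff q == l1) := by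
    apply List.filter_congr; intro q _
    rw [pv_rank_eq]; split_ifs with a b c <;> simp_all
  have hfe2 : sq.filter (fun q => pvRank [l0, l1, l2] q == 2)
      = sq.filter (fun q => pvEff q == l2) := by
    apply List.filter_congr; intro q _
    rw [pv_rank_eq]; split_ifs with a b c <;> simp_all
  rw [pv_emit_eq_foldl, pv_sorted_partition _ _ hb, hfe0, hfe1, hfe2]
  simp only [List.foldl_cons, List.foldl_nil, pv_foldA_label, List.foldl_append]
  set st1 := (sq.filter (fun q => pvEff q == l2)).foldl (pvStepFBA limit)
      ((sq.filter (fun q => pvEff q == l1)).foldl (pvStepFBA limit)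
        ((sq.filter (fun q => pvEff q == l0)).foldl (pvStepFBA limit)
          ([], PySem.Set.empty, false))) with hst1
  have hst1' : st1 = (sq.filter (fun q => pvEff q == l0) ++ sq.filter (fun q => pvEff q == l1)
      ++ sq.filter (fun q => pvEff q == l2)).foldl (pvStepFBA limit)
        ([], PySem.Set.empty, false) := by
    rw [List.foldl_append, List.foldl_append]
  by_cases hstop : st1.2.2 = true
  · rw [pv_stop_foldl limit sq st1 hstop, pv_stop_foldl limit _ st1 hstop]
  · rcases pv_seen_inv limit (sq.filter (fun q => pvEff q == l0)
        ++ sq.filter (fun q => pvEff q == l1) ++ sq.filter (fun q => pvEff q == l2))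
        ([], PySem.Set.empty, false) with h | h
    · rw [← hst1'] at h; exact absurd h hstop
    · rw [← hst1'] at h
      rw [pv_drop limit (fun q => pvRank [l0, l1, l2] q == 3) sq st1 ?_]
      intro q hq hq3
      change (pvRank [l0, l1, l2] q == 3) = false at hq3
      have hlab : pvEff q = l0 ∨ pvEff q = l1 ∨ pvEff q = l2 := by
        rw [pv_rank_eq] at hq3; split_ifs at hq3 with a b c <;> simp_all
      apply h
      rcases hlab with he | he | he
      · exact List.mem_append.mpr (Or.inl (List.mem_append.mpr (Or.inl
          (List.mem_filter.mpr ⟨hq, by simp [he]⟩))))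
      · exact List.mem_append.mpr (Or.inl (List.mem_append.mpr (Or.inr
          (List.mem_filter.mpr ⟨hq, by simp [he]⟩))))
      · exact List.mem_append.mpr (Or.inr (List.mem_filter.mpr ⟨hq, by simp [he]⟩))

-- the looked-up priority list is one of three concrete distinct-label lists
theorem pv_priority_cases (tl : String) :
    (PySem.Dict.mk
      [("Hard", ["Hard", "Medium", "Easy"]),
       ("Medium", ["Medium", "Hard", "Easy"]),
       ("Easy", ["Easy", "Medium", "Hard"])]).getD tl ["Medium", "Hard", "Easy"]
      = ["Hard", "Medium", "Easy"]
    ∨ (PySem.Dict.mk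
      [("Hard", ["Hard", "Medium", "Easy"]),
       ("Medium", ["Medium", "Hard", "Easy"]),
       ("Easy", ["Easy", "Medium", "Hard"])]).getD tl ["Medium", "Hard", "Easy"]
      = ["Medium", "Hard", "Easy"]
    ∨ (PySem.Dict.mk
      [("Hard", ["Hard", "Medium", "Easy"]),
       ("Medium", ["Medium", "Hard", "Easy"]),
       ("Easy", ["Easy", "Medium", "Hard"])]).getD tl ["Medium", "Hard", "Easy"]
      = ["Easy", "Medium", "Hard"] := by
  simp only [PySem.Dict.getD, PySem.Dict.get?, List.find?]
  by_cases h : "Hard" = tl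
  · simp [← h]
  · simp only [show (("Hard" : String) == tl) = false by simpa using h]
    by_cases h2 : "Medium" = tl
    · simp [← h2]
    · simp only [show (("Medium" : String) == tl) = false by simpa using h2]
      by_cases h3 : "Easy" = tl
      · simp [← h3]
      · simp [show (("Easy" : String) == tl) = false by simpa using h3]

-- ===== VERDICT (by name: the statement is the Claim_ definition above) =====
theorem build_adaptive_module2_set_py_spec : Claim_equal_build_adaptive_module2_set_py := by
  intro sq tl limit _
  unfold Spec_build_adaptive_module2_set_py
  unfold build_adaptive_module2_set_py build_adaptive_module2_set_py_alt
  rcases pv_priority_cases tl with h | h | h <;> rw [h] <;>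
    exact pv_main limit sq _ _ _ (by decide) (by decide) (by decide)
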